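-- pv_equiv track=rewrite | github.com/laurisdjilo/data_visualization | src/credit.py | code_feature
-- ===== SOURCE A (Python) =====
-- def code_feature(obsv_feature):
--     result = {}
--     code = 0
--     for row in obsv_feature:
--         if not row in result:
--             result[row]=code
--             code = code+1
--     return result
-- ===== SOURCE B (Python) =====
-- def code_feature(obsv_feature):
--     first = {}
--     for i in range(len(obsv_feature) - 1, -1, -1):
--         first[obsv_feature[i]] = i
--     order = sorted(first, key=first.get)
--     return {row: code for code, row in enumerate(order)}
-- ===== Notes on version B (the rewrite author's own statement) =====
-- stated objective: alternative
-- what changed: Replaces A's single forward pass with a guarded counter (insert-if-absent, increment) by a three-stage pipeline: a reverse index scan that overwrites first[row]=i so the smallest (first-occurrence) index wins with no membership test, then sorting the distinct values by that first index, then numbering them with enumerate.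
import Mathlib
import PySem

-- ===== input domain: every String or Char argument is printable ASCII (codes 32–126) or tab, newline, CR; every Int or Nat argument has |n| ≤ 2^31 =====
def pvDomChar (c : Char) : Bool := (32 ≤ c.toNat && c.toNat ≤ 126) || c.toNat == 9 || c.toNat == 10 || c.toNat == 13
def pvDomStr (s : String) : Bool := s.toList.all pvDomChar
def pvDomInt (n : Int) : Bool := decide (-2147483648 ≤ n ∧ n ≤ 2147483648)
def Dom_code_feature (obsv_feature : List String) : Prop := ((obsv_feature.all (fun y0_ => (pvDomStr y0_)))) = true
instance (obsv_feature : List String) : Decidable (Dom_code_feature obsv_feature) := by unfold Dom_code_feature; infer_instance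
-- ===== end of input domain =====

-- B replaces A's guarded-counter loop by a reverse overwrite scan recording each value's
-- first-occurrence index, a sort by that index, and an enumerate; alternative algorithm, similar cost.

-- ===== PORT A =====
def code_feature (obsv_feature : List String) : List (String × Int) :=
  (obsv_feature.foldl
    (fun (st : PySem.Dict String Int × Int) row =>
      if st.1.contains row then st else (st.1.insert row st.2, st.2 + 1))
    (PySem.Dict.empty, 0)).1.items

-- ===== PORT B =====
-- Source B: reverse index loop overwriting first[row]=i, then sorted(first, key=first.get),
-- then the dict comprehension (distinct keys, so its items are the generated pairs in order).
def code_feature_alt (obsv_feature : List String) : List (String × Int) :=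
  let first := (PySem.List.pyRange ((obsv_feature.length : Int) - 1) (-1) (-1)).foldl
      (fun (d : PySem.Dict String Int) i => d.insert (PySem.List.pyGetD obsv_feature i "") i)
      PySem.Dict.empty
  let order := PySem.List.sorted first.keys (fun r => first.getD r 0) false
  (PySem.List.enumerate order 0).map (fun p => (p.2, p.1))

-- ===== PRECONDITION & SPEC =====
def Spec_code_feature (obsv_feature : List String) (out : List (String × Int)) : Prop := out = code_feature_alt obsv_feature
instance (obsv_feature : List String) (out : List (String × Int)) : Decidable (Spec_code_feature obsv_feature out) := by unfold Spec_code_feature; infer_instance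

-- ===== CLAIM (what is proved, stated in full; the proofs are below) =====
def Claim_equal_code_feature : Prop := ∀ (obsv_feature : List String), Dom_code_feature obsv_feature → Spec_code_feature obsv_feature (code_feature obsv_feature)

-- ===== LEMMAS AND PROOFS =====

-- canonical form both sides are reduced to: first-seen distinct values numbered in order
def pvCanon (xs : List String) : List (String × Int) :=
  (PySem.List.enumerate (PySem.List.dedup xs) 0).map (fun p => (p.2, p.1))

theorem foldl_add_prefix (xs : List String) : ∀ (s : List String),
    ∃ t, xs.foldl PySem.Set.add s = s ++ t := by
  induction xs with
  | nil => intro s; exact ⟨[], by simp⟩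
  | cons x xs ih =>
    intro s
    simp only [List.foldl_cons, PySem.Set.add]
    by_cases h : x ∈ s
    · simpa [h] using ih s
    · obtain ⟨t, ht⟩ := ih (s ++ [x])
      exact ⟨x :: t, by simp [h, ht]⟩

theorem loop_invariant (xs : List String) : ∀ (d : PySem.Dict String Int) (code : Int),
    d.keys.Nodup →
    (xs.foldl
      (fun (st : PySem.Dict String Int × Int) row =>
        if st.1.contains row then st else (st.1.insert row st.2, st.2 + 1))
      (d, code)).1.items
    = d.items ++ (PySem.List.enumerate
        ((xs.foldl PySem.Set.add d.keys).drop d.keys.length) code).map (fun p => (p.2, p.1)) := by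
  induction xs with
  | nil =>
    intro d code _
    simp [PySem.List.enumerate_nil]
  | cons x xs ih =>
    intro d code hnd
    by_cases h : d.contains x = true
    · have hmem : x ∈ d.keys := (PySem.Dict.contains_iff_mem_keys d x).mp h
      have hadd : PySem.Set.add d.keys x = d.keys := by
        simp [PySem.Set.add, PySem.Set.contains, hmem]
      simp only [List.foldl_cons, h, if_true, PySem.Set.add] at *
      rw [ih d code hnd]
      simp [PySem.Set.contains, hmem]
    · have hmem : x ∉ d.keys := fun hx => h ((PySem.Dict.contains_iff_mem_keys d x).mpr hx)
      have hkeys : (d.insert x code).keys = d.keys ++ [x] :=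
        PySem.Dict.keys_insert_of_not_contains d code (by simpa using h)
      have hnd' : (d.insert x code).keys.Nodup := by
        rw [hkeys]
        exact hnd.append (List.nodup_singleton x)
          (fun a ha hb => hmem ((List.mem_singleton.mp hb) ▸ ha))
      have hitems : (d.insert x code).items = d.items ++ [(x, code)] :=
        PySem.Dict.items_insert_of_not_contains d code (by simpa using h)
      have hadd : PySem.Set.add d.keys x = d.keys ++ [x] := by
        simp [PySem.Set.add, PySem.Set.contains, hmem]
      obtain ⟨t, ht⟩ := foldl_add_prefix xs (d.keys ++ [x])
      simp only [List.foldl_cons, h, if_false, Bool.false_eq_true, hadd]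
      rw [ih (d.insert x code) (code + 1) hnd', hitems, hkeys, ht]
      have hd1 : (d.keys ++ [x] ++ t).drop d.keys.length = x :: t := by
        rw [List.append_assoc, List.drop_append_of_le_length (le_refl _)]
        simp
      have hd2 : (d.keys ++ [x] ++ t).drop (d.keys ++ [x]).length = t := by
        rw [List.drop_append_of_le_length (le_refl _)]
        simp
      rw [hd1, hd2, PySem.List.enumerate_cons]
      simp

theorem a_eq_canon (xs : List String) : code_feature xs = pvCanon xs := by
  unfold code_feature pvCanon
  rw [loop_invariant xs PySem.Dict.empty 0 (by simp [pysem])]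
  have h1 : (PySem.Dict.empty : PySem.Dict String Int).items = [] := rfl
  have h2 : (PySem.Dict.empty : PySem.Dict String Int).keys = [] := rfl
  rw [h1, h2]
  simp [PySem.List.dedup, PySem.Set.ofList_eq_foldl]

-- the reverse loop's dict: get? r is r's first-occurrence index in xs
def pvFirst (xs : List String) (d0 : PySem.Dict String Int) : PySem.Dict String Int :=
  (PySem.List.enumerate xs 0).reverse.foldl (fun d p => d.insert p.2 p.1) d0

theorem pvFirst_get? (xs : List String) : ∀ (d0 : PySem.Dict String Int) (r : String),
    (pvFirst xs d0).get? r
      = match PySem.List.index? xs r with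
        | some k => some (k : Int)
        | none => d0.get? r := by
  induction xs using List.reverseRecOn with
  | nil =>
    intro d0 r
    simp [pvFirst, PySem.List.enumerate_nil]
  | append_singleton xs x ih =>
    intro d0 r
    have henum : (PySem.List.enumerate (xs ++ [x]) 0).reverse
        = ((0:Int) + (xs.length:Int), x) :: (PySem.List.enumerate xs 0).reverse := by
      rw [PySem.List.enumerate_append, PySem.List.enumerate_cons, PySem.List.enumerate_nil]
      simp
    unfold pvFirst
    rw [henum, List.foldl_cons]
    have hih := ih (d0.insert x ((0:Int) + (xs.length:Int))) r
    unfold pvFirst at hih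
    rw [hih]
    by_cases hr : r ∈ xs
    · rw [PySem.List.index?_append_of_mem [x] hr]
      obtain ⟨k, hk⟩ := Option.isSome_iff_exists.mp ((PySem.List.index?_isSome_iff _ _).mpr hr)
      rw [hk]
    · have hnone : PySem.List.index? xs r = none := (PySem.List.index?_eq_none_iff _ _).mpr hr
      rw [hnone]
      by_cases hrx : r = x
      · subst hrx
        rw [PySem.List.index?_append_singleton_self xs r hr]
        simp [PySem.Dict.get?_insert_self]
      · have hnone2 : PySem.List.index? (xs ++ [x]) r = none := by
          rw [PySem.List.index?_eq_none_iff]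
          simp [hr, hrx]
        rw [hnone2]
        exact PySem.Dict.get?_insert_of_ne _ _ hrx

theorem pvFirst_keys_mem (xs : List String) (d0 : PySem.Dict String Int) (r : String) :
    r ∈ (pvFirst xs d0).keys ↔ r ∈ xs ∨ r ∈ d0.keys := by
  unfold pvFirst
  have hk : ((PySem.List.enumerate xs 0).reverse.foldl (fun d p => d.insert p.2 p.1) d0).keys
      = PySem.Set.update d0.keys (((PySem.List.enumerate xs 0).reverse).map (fun p => p.2)) :=
    PySem.Dict.keys_foldl_insert_key ((PySem.List.enumerate xs 0).reverse) (fun (p : Int × String) => p.2) (fun _ (p : Int × String) => p.1) d0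
  rw [hk, List.map_reverse, PySem.List.map_snd_enumerate, PySem.Set.mem_update, List.mem_reverse]
  tauto

theorem pvFirst_keys_nodup (xs : List String) : (pvFirst xs PySem.Dict.empty).keys.Nodup := by
  unfold pvFirst
  exact PySem.Dict.nodup_keys_foldl_insert_key ((PySem.List.enumerate xs 0).reverse)
    (fun (p : Int × String) => p.2) (fun _ (p : Int × String) => p.1) PySem.Dict.empty
    PySem.Dict.nodup_keys_empty

theorem dedup_pairwise_first_idx (xs : List String) :
    (PySem.List.dedup xs).Pairwise
      (fun a b => (PySem.List.index? xs a).getD 0 < (PySem.List.index? xs b).getD 0) := by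
  induction xs using List.reverseRecOn with
  | nil => simp [PySem.List.dedup]
  | append_singleton xs x ih =>
    have hded : PySem.List.dedup (xs ++ [x]) = PySem.Set.add (PySem.List.dedup xs) x := by
      simp [PySem.List.dedup, PySem.Set.ofList_eq_foldl, List.foldl_append]
    rw [hded, PySem.Set.add]
    have hpre : (PySem.List.dedup xs).Pairwise
        (fun a b => (PySem.List.index? (xs ++ [x]) a).getD 0 < (PySem.List.index? (xs ++ [x]) b).getD 0) := by
      refine List.Pairwise.imp_of_mem ?_ ih
      intro a b ha hb hab
      rw [PySem.List.index?_append_of_mem [x] ((PySem.List.mem_dedup _ _).mp ha),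
          PySem.List.index?_append_of_mem [x] ((PySem.List.mem_dedup _ _).mp hb)]
      exact hab
    by_cases hx : x ∈ xs
    · have : PySem.Set.contains (PySem.List.dedup xs) x = true := by
        simp [PySem.Set.contains, hx]
      rw [this, if_pos rfl]
      exact hpre
    · have : PySem.Set.contains (PySem.List.dedup xs) x = false := by
        simp [PySem.Set.contains, hx]
      rw [this]
      simp only [Bool.false_eq_true, if_false]
      rw [List.pairwise_append]
      refine ⟨hpre, List.pairwise_singleton _ _, ?_⟩
      intro a ha b hb
      rw [List.mem_singleton] at hb
      subst hb
      have hax : a ∈ xs := (PySem.List.mem_dedup _ _).mp ha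
      obtain ⟨k, hk⟩ := Option.isSome_iff_exists.mp ((PySem.List.index?_isSome_iff _ _).mpr hax)
      obtain ⟨hklt, -, -⟩ := PySem.List.getElem_of_index?_eq_some hk
      rw [PySem.List.index?_append_of_mem [b] hax, hk,
          PySem.List.index?_append_singleton_self xs b hx]
      simpa using hklt

theorem b_eq_canon (xs : List String) : code_feature_alt xs = pvCanon xs := by
  unfold code_feature_alt
  have hconv : (PySem.List.pyRange ((xs.length : Int) - 1) (-1) (-1)).foldl
      (fun (d : PySem.Dict String Int) i => d.insert (PySem.List.pyGetD xs i "") i)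
      PySem.Dict.empty = pvFirst xs PySem.Dict.empty := by
    rw [PySem.List.pyRange_neg_one_eq_reverse]
    rw [show ((-1:Int) + 1) = 0 by ring, show ((xs.length:Int) - 1 + 1) = (xs.length:Int) by ring]
    unfold pvFirst
    rw [PySem.List.enumerate_eq_map_pyRange xs ""]
    rw [show (PySem.List.len xs) = (xs.length:Int) from PySem.List.len_eq xs]
    rw [← List.map_reverse, List.foldl_map]
  rw [hconv]
  have hsort : PySem.List.sorted (pvFirst xs PySem.Dict.empty).keys
      (fun r => (pvFirst xs PySem.Dict.empty).getD r 0) false = PySem.List.dedup xs := by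
    apply PySem.List.sorted_eq_of_perm_of_pairwise_lt
    · apply (List.perm_ext_iff_of_nodup (PySem.List.nodup_dedup xs) (pvFirst_keys_nodup xs)).mpr
      intro a
      rw [PySem.List.mem_dedup, pvFirst_keys_mem]
      simp [PySem.Dict.keys_empty]
    · refine List.Pairwise.imp_of_mem ?_ (dedup_pairwise_first_idx xs)
      intro a b ha hb hab
      have haxs : a ∈ xs := (PySem.List.mem_dedup _ _).mp ha
      have hbxs : b ∈ xs := (PySem.List.mem_dedup _ _).mp hb
      obtain ⟨ka, hka⟩ := Option.isSome_iff_exists.mp ((PySem.List.index?_isSome_iff _ _).mpr haxs)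
      obtain ⟨kb, hkb⟩ := Option.isSome_iff_exists.mp ((PySem.List.index?_isSome_iff _ _).mpr hbxs)
      have hga : (pvFirst xs PySem.Dict.empty).getD a 0 = (ka : Int) := by
        rw [PySem.Dict.getD_eq_get?_getD, pvFirst_get?, hka]
        rfl
      have hgb : (pvFirst xs PySem.Dict.empty).getD b 0 = (kb : Int) := by
        rw [PySem.Dict.getD_eq_get?_getD, pvFirst_get?, hkb]
        rfl
      
      rw [hka, hkb] at hab
      simp only [Option.getD_some] at hab
      rw [hga, hgb]
      exact_mod_cast hab
  refine Eq.trans (b := (PySem.List.enumerate (PySem.List.sorted (pvFirst xs PySem.Dict.empty).keys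
      (fun r => (pvFirst xs PySem.Dict.empty).getD r 0) false) 0).map (fun p => (p.2, p.1))) rfl ?_
  rw [hsort]
  rfl

-- ===== VERDICT (by name: the statement is the Claim_ definition above) =====
theorem code_feature_spec : Claim_equal_code_feature := by
  intro xs _
  unfold Spec_code_feature
  rw [a_eq_canon, b_eq_canon]
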